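-- pv_equiv track=rewrite | github.com/Kevinparashar/motadata_GranularLevel_sdk_Faas | src/core/postgresql_database/connection.py | _convert_placeholders
-- ===== SOURCE A (Python) =====
-- def _convert_placeholders(query: str, param_count: int) -> str:
--     """
--     Convert %s placeholders to $1, $2, etc. for asyncpg.
--
--     Args:
--         query (str): SQL query with %s placeholders.
--         param_count (int): Number of parameters.
--
--     Returns:
--         str: Query with $1, $2, etc. placeholders.
--     """
--     parts = query.split('%s')
--     if len(parts) <= 1:
--         # Query already uses $1, $2 format or has no placeholders
--         return query
--
--     # Rebuild query with numbered placeholders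
--     query_parts = []
--     for i, part in enumerate(parts):
--         query_parts.append(part)
--         if i < len(parts) - 1:
--             query_parts.append(f'${i + 1}')
--     return ''.join(query_parts)
-- ===== SOURCE B (Python) =====
-- def _convert_placeholders(query: str, param_count: int) -> str:
--     # Single left-to-right scan with a counter, instead of split-and-rebuild.
--     out = []
--     n = 1
--     i = 0
--     while i < len(query):
--         if query.startswith('%s', i):
--             out.append('$%d' % n)
--             n += 1
--             i += 2
--         else:
--             out.append(query[i])
--             i += 1
--     return ''.join(out)
-- ===== Notes on version B (the rewrite author's own statement) =====
-- stated objective: alternative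
-- what changed: B replaces A's split-on-'%s'-then-rebuild-and-join (three passes with an intermediate parts list) by a single left-to-right scan of the string with an incrementing counter, emitting '$n' at each '%s' occurrence.
import Mathlib
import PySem

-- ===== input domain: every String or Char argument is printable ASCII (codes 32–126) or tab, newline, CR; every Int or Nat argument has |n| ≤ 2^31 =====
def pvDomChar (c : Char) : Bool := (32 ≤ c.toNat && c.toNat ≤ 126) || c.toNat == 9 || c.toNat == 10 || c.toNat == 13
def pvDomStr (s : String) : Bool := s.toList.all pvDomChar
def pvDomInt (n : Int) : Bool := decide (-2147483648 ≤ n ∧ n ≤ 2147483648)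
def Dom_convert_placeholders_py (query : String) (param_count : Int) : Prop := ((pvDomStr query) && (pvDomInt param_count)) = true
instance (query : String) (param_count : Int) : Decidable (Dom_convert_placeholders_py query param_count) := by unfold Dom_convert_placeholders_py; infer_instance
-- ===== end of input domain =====

-- B replaces A's split-and-rebuild by one left-to-right scan with a counter; same cost, different structure.

-- ===== PORT A =====
def convert_placeholders_py (query : String) (param_count : Int) : String :=
  let parts := PySem.Chars.splitOn query.toList ['%', 's']
  if parts.length ≤ 1 then query
  else
    let query_parts := (PySem.List.enumerate parts).foldl
      (fun acc ip =>
        let acc2 := acc ++ [ip.2]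
        if ip.1 < (parts.length : Int) - 1 then acc2 ++ ['$' :: PySem.Int.toChars (ip.1 + 1)] else acc2)
      []
    String.ofList (PySem.Chars.join [] query_parts)

-- ===== PORT B =====
-- B's while loop over the index: recursion on the remaining suffix, counter n.
def pvScanB : List Char → Int → List Char
  | [], _ => []
  | c :: rest, n =>
    if ['%', 's'].isPrefixOf (c :: rest) then
      ('$' :: PySem.Int.toChars n) ++ pvScanB (rest.drop 1) (n + 1)
    else
      c :: pvScanB rest n
termination_by l => l.length
decreasing_by all_goals (simp; try omega)

def convert_placeholders_py_alt (query : String) (param_count : Int) : String :=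
  String.ofList (pvScanB query.toList 1)

-- ===== PRECONDITION & SPEC =====
def Spec_convert_placeholders_py (query : String) (param_count : Int) (out : String) : Prop := out = convert_placeholders_py_alt query param_count
instance (query : String) (param_count : Int) (out : String) : Decidable (Spec_convert_placeholders_py query param_count out) := by unfold Spec_convert_placeholders_py; infer_instance

-- ===== CLAIM (what is proved, stated in full; the proofs are below) =====
def Claim_equal_convert_placeholders_py : Prop := ∀ (query : String) (param_count : Int), Dom_convert_placeholders_py query param_count → Spec_convert_placeholders_py query param_count (convert_placeholders_py query param_count)

-- ===== LEMMAS AND PROOFS =====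

/-- Prepend `pre` onto the first piece (or make it the only piece). -/
def pvConsHead (pre : List Char) : List (List Char) → List (List Char)
  | [] => [pre]
  | p :: ps => (pre ++ p) :: ps

/-- Reference version of Python `split('%s')`. -/
def pvSplit : List Char → List (List Char)
  | [] => [[]]
  | c :: rest =>
    if ['%', 's'].isPrefixOf (c :: rest) then [] :: pvSplit (rest.drop 1)
    else pvConsHead [c] (pvSplit rest)
termination_by l => l.length
decreasing_by all_goals (simp; try omega)

theorem pvSplit_ne_nil (l : List Char) : pvSplit l ≠ [] := by
  cases l with
  | nil => simp [pvSplit]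
  | cons c rest =>
    rw [pvSplit]
    split
    · simp
    · cases pvSplit rest <;> simp [pvConsHead]

theorem pvConsHead_nil (X : List (List Char)) (h : X ≠ []) : pvConsHead [] X = X := by
  cases X with
  | nil => exact absurd rfl h
  | cons p ps => simp [pvConsHead]

theorem pvConsHead_consHead (a b : List Char) (X : List (List Char)) :
    pvConsHead a (pvConsHead b X) = pvConsHead (a ++ b) X := by
  cases X <;> simp [pvConsHead]

theorem pv_go_eq (fuel : ℕ) : ∀ (l cur : List Char) (acc : List (List Char)), l.length < fuel →
    PySem.Chars.splitOn.go ['%', 's'] fuel l cur acc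
      = acc.reverse ++ pvConsHead cur.reverse (pvSplit l) := by
  induction fuel with
  | zero => intro l cur acc h; omega
  | succ f ih =>
    intro l cur acc h
    cases l with
    | nil =>
      simp [PySem.Chars.splitOn.go, pvSplit, pvConsHead]
    | cons c rest =>
      rw [PySem.Chars.splitOn.go, pvSplit]
      split
      · rw [ih _ _ _ (by simp at h ⊢; omega)]
        simp only [List.reverse_cons, List.reverse_nil, List.drop_one]
        rw [pvConsHead_nil _ (pvSplit_ne_nil _)]
        simp [pvConsHead, List.drop_one]
      · rw [ih _ _ _ (by simp at h ⊢; omega), pvConsHead_consHead]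
        simp

theorem pv_splitOn_eq (cs : List Char) :
    PySem.Chars.splitOn cs ['%', 's'] = pvSplit cs := by
  rw [PySem.Chars.splitOn, pv_go_eq]
  · simp [pvConsHead_nil _ (pvSplit_ne_nil _)]
  · omega

/-- Interleave parts with `$k`, `$‹k+1›`, … between them. -/
def pvInter : List (List Char) → Int → List Char
  | [], _ => []
  | [p], _ => p
  | p :: q :: ps, k => p ++ ('$' :: PySem.Int.toChars k) ++ pvInter (q :: ps) (k + 1)

theorem pv_scan_eq (cs : List Char) : ∀ (k : Int), pvScanB cs k = pvInter (pvSplit cs) k := by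
  induction cs using pvSplit.induct with
  | case1 => intro k; simp [pvScanB, pvSplit, pvInter]
  | case2 c rest hpre ih =>
    intro k
    rw [pvScanB, pvSplit, if_pos hpre, if_pos hpre, ih]
    obtain ⟨p, ps, hps⟩ : ∃ p ps, pvSplit (rest.drop 1) = p :: ps := by
      cases h : pvSplit (rest.drop 1) with
      | nil => exact absurd h (pvSplit_ne_nil _)
      | cons p ps => exact ⟨p, ps, rfl⟩
    rw [hps]; simp [pvInter]
  | case3 c rest hpre ih =>
    intro k
    rw [pvScanB, pvSplit, if_neg hpre, if_neg hpre, ih]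
    cases h : pvSplit rest with
    | nil => exact absurd h (pvSplit_ne_nil _)
    | cons p ps => cases ps <;> simp [pvConsHead, pvInter]

theorem pv_singleton (cs p : List Char) (h : pvSplit cs = [p]) : p = cs := by
  induction cs using pvSplit.induct generalizing p with
  | case1 => simp [pvSplit] at h; simp [h]
  | case2 c rest hpre ih =>
    rw [pvSplit, if_pos hpre] at h
    have := pvSplit_ne_nil (rest.drop 1)
    cases hh : pvSplit (rest.drop 1) <;> simp_all
  | case3 c rest hpre ih =>
    rw [pvSplit, if_neg hpre] at h
    cases hh : pvSplit rest with
    | nil => exact absurd hh (pvSplit_ne_nil _)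
    | cons q qs =>
      rw [hh] at h
      simp [pvConsHead] at h
      obtain ⟨h1, h2⟩ := h
      subst h2
      have hq := ih q hh
      simp_all

theorem pv_join_nil (l : List (List Char)) : PySem.Chars.join [] l = l.flatten := by
  induction l with
  | nil => simp [PySem.Chars.join, List.intercalate]
  | cons p ps ih =>
    cases ps <;> simp_all [PySem.Chars.join, List.intercalate, List.intersperse]

theorem pv_foldA (L : Int) (ps : List (List Char)) : ∀ (s : Int) (acc : List (List Char)),
    ps ≠ [] → s + ps.length = L →
    (List.foldl
      (fun acc ip =>
        let acc2 := acc ++ [ip.2]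
        if ip.1 < L - 1 then acc2 ++ ['$' :: PySem.Int.toChars (ip.1 + 1)] else acc2)
      acc (PySem.List.enumerate ps s)).flatten
      = acc.flatten ++ pvInter ps (s + 1) := by
  induction ps with
  | nil => intro s acc h; exact absurd rfl h
  | cons p t ih =>
    intro s acc _ hL
    rw [show PySem.List.enumerate (p :: t) s = (s, p) :: PySem.List.enumerate t (s + 1) from by
      simp [PySem.List.enumerate]]
    rw [List.foldl_cons]
    cases t with
    | nil =>
      have hnlt : ¬ (s < L - 1) := by simp at hL; omega
      simp [PySem.List.enumerate, hnlt, pvInter]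
    | cons q ts =>
      have hlt : s < L - 1 := by simp at hL; omega
      rw [ih (s + 1) _ (by simp) (by simp at hL ⊢; omega)]
      simp [hlt, pvInter]

-- ===== VERDICT (by name: the statement is the Claim_ definition above) =====
theorem convert_placeholders_py_spec : Claim_equal_convert_placeholders_py := by
  intro query pc _
  unfold Spec_convert_placeholders_py convert_placeholders_py convert_placeholders_py_alt
  simp only [pv_splitOn_eq]
  cases h : pvSplit query.toList with
  | nil => exact absurd h (pvSplit_ne_nil _)
  | cons p ps =>
    cases ps with
    | nil =>
      have hp : p = query.toList := pv_singleton _ _ h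
      rw [if_pos (by simp)]
      rw [pv_scan_eq, h, hp]
      simp [pvInter, String.ofList]
    | cons q ts =>
      rw [if_neg (by simp)]
      rw [pv_join_nil, pv_foldA (((p :: q :: ts).length : Nat) : Int) _ 0 [] (by simp) (by simp)]
      rw [pv_scan_eq, h]
      simp [pvInter]
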